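-- pv_equiv track=rewrite | github.com/SJLee-83/CodingTest | lv1/c1205_newid_f.py | solution
-- ===== SOURCE A (Python) =====
-- def solution(new_id):
--     # 1단계: 모든 대문자를 대응되는 소문자로 치환
--     answer = new_id.lower()
--
--     # 2단계: 알파벳 소문자, 숫자, 빼기(-), 밑줄(_), 마침표(.)를 제외한 모든 문자를 제거
--     # (허용된 문자만 필터링해서 다시 합침)
--     filtered_answer = ''
--     for char in answer:
--         if char.isalnum() or char in ['-', '_', '.']:
--             filtered_answer += char
--     answer = filtered_answer
--
--     # 3단계: 마침표(.)가 2번 이상 연속된 부분을 하나의 마침표(.)로 치환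
--     while '..' in answer:
--         answer = answer.replace('..', '.')
--
--     # 4단계: 마침표(.)가 처음이나 끝에 위치한다면 제거
--     answer = answer.strip('.')
--
--     # 5단계: 빈 문자열이라면, "a"를 대입
--     if not answer: # if answer == '': 와 동일
--         answer = 'a'
--
--     # 6단계: 길이가 16자 이상이면, 첫 15개의 문자를 제외한 나머지 문자들을 모두 제거
--     if len(answer) >= 16:
--         answer = answer[:15]
--         # 제거 후 마침표(.)가 끝에 위치한다면 제거
--         answer = answer.rstrip('.')
--
--     # 7단계: 길이가 2자 이하라면, 마지막 문자를 길이가 3이 될 때까지 반복해서 끝에 붙임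
--     while len(answer) < 3:
--         answer += answer[-1]
--
--     return answer
-- ===== SOURCE B (Python) =====
-- def solution(new_id):
--     # One fused pass: lowercase, keep only allowed chars, and collapse runs of
--     # '.' by checking the last emitted character.
--     out = []
--     for ch in new_id:
--         c = ch.lower()
--         if c.isalnum() or c in "-_.":
--             if c != '.' or not (out and out[-1] == '.'):
--                 out.append(c)
--     answer = ''.join(out).strip('.')
--     if not answer:
--         answer = 'a'
--     if len(answer) >= 16:
--         answer = answer[:15].rstrip('.')
--     if len(answer) < 3:
--         answer += answer[-1] * (3 - len(answer))
--     return answer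
-- ===== Notes on version B (the rewrite author's own statement) =====
-- stated objective: alternative
-- what changed: A filters with one loop and then collapses runs of consecutive dots by repeatedly calling str.replace inside a while loop; B does a single fused pass that lowercases, filters and collapses dot runs by tracking the last emitted character, then applies the tail steps with a closed-form pad instead of A's while-append loop.
import Mathlib
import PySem

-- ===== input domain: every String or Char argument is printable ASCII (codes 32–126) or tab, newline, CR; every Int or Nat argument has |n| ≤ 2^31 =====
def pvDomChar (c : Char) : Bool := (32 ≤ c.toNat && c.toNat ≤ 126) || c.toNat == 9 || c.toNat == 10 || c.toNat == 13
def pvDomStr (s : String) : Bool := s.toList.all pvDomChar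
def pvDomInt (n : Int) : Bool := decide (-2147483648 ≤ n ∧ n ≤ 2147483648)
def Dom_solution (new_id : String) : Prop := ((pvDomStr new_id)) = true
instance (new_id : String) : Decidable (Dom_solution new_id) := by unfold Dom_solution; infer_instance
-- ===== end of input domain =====

-- B fuses A's filter pass and repeated '..'-replace passes into one stateful pass (objective: alternative decomposition).

-- ===== PORT A =====
-- helper used only to state the termination lemma of the while-replace loop:
-- pvRepl is one left-to-right non-overlapping replacement of ".." by "."
def pvRepl : List Char → List Char
  | [] => []
  | [c] => [c]
  | c :: d :: r => if c = '.' ∧ d = '.' then '.' :: pvRepl r else c :: pvRepl (d :: r)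

theorem pvRepl_length_le (s : List Char) : (pvRepl s).length ≤ s.length := by
  fun_induction pvRepl s <;> simp_all <;> omega

theorem replace_go_eq (fuel : Nat) : ∀ (l acc : List Char), l.length ≤ fuel →
    PySem.Chars.replace.go ['.', '.'] ['.'] fuel l acc = acc.reverse ++ pvRepl l := by
  induction fuel with
  | zero =>
    intro l acc h
    have : l = [] := List.eq_nil_of_length_eq_zero (Nat.le_zero.mp h)
    subst this
    simp [PySem.Chars.replace.go, pvRepl]
  | succ n ih =>
    intro l acc h
    match l with
    | [] => simp [PySem.Chars.replace.go, pvRepl]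
    | [c] =>
      rw [PySem.Chars.replace.go]
      have hpre : (['.', '.'] : List Char).isPrefixOf [c] = false := by
        simp [List.isPrefixOf]
      simp only [hpre]
      rw [ih [] (c :: acc) (by simp)]
      simp [pvRepl]
    | c :: d :: r =>
      rw [PySem.Chars.replace.go]
      by_cases hc : c = '.' ∧ d = '.'
      · obtain ⟨hc1, hc2⟩ := hc
        subst hc1; subst hc2
        have hpre : (['.', '.'] : List Char).isPrefixOf ('.' :: '.' :: r) = true := by
          simp [List.isPrefixOf]
        simp only [hpre, if_true, List.length_cons, List.length_nil, List.drop_succ_cons,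
          List.drop_zero, List.reverse_cons, List.reverse_nil, List.nil_append]
        rw [ih r (['.'] ++ acc) (by simp at h ⊢; omega)]
        simp [pvRepl]
      · have hpre : (['.', '.'] : List Char).isPrefixOf (c :: d :: r) = false := by
          simp [List.isPrefixOf]
          intro h1 h2; exact hc ⟨h1.symm, h2.symm⟩
        simp only [hpre]
        rw [ih (d :: r) (c :: acc) (by simp at h ⊢; omega)]
        simp [pvRepl, hc]

theorem replace_eq_pvRepl (s : List Char) :
    PySem.Chars.replace s ['.', '.'] ['.'] = pvRepl s := by
  simp only [PySem.Chars.replace]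
  norm_num
  rw [replace_go_eq s.length s [] le_rfl]
  simp

theorem pvRepl_length_lt (s : List Char) (h : ['.', '.'] <:+: s) :
    (pvRepl s).length < s.length := by
  induction s with
  | nil => simp at h
  | cons c t ihc =>
    match t, ihc with
    | [], _ =>
      rcases List.infix_cons_iff.mp h with hp | hi
      · simp at hp
      · simp at hi
    | d :: r, ih =>
      rw [pvRepl]
      by_cases hc : c = '.' ∧ d = '.'
      · have := pvRepl_length_le r
        simp [hc]; omega
      · rcases List.infix_cons_iff.mp h with hp | hi
        · exfalso
          rcases hp with ⟨u, hu⟩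
          simp at hu
          exact hc ⟨hu.1.symm, hu.2.1.symm⟩
        · have := ih hi
          simp [hc] at this ⊢
          omega

theorem pvReplace_length_lt (s : List Char) (h : PySem.Chars.isIn ['.', '.'] s = true) :
    (PySem.Chars.replace s ['.', '.'] ['.']).length < s.length := by
  rw [replace_eq_pvRepl]
  exact pvRepl_length_lt s ((PySem.Chars.isIn_iff_infix _ _).mp h)

-- port of answer.rstrip('.')  (both Pythons call this builtin)
def pvRstripDots (s : List Char) : List Char :=
  (s.reverse.dropWhile (fun c => c = '.')).reverse

-- port of:  while '..' in answer: answer = answer.replace('..', '.')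
def pvLoopA (s : List Char) : List Char :=
  if h : PySem.Chars.isIn ['.', '.'] s = true then
    pvLoopA (PySem.Chars.replace s ['.', '.'] ['.'])
  else s
  termination_by s.length
  decreasing_by exact pvReplace_length_lt s h

-- port of:  while len(answer) < 3: answer += answer[-1]
def pvPadA (s : List Char) : List Char :=
  if h : s.length < 3 then
    match hg : PySem.List.pyGet? s (-1) with
    | some c => pvPadA (s ++ [c])
    | none => s  -- Python raises IndexError here; unreachable (s is nonempty at the call site)
  else s
  termination_by 3 - s.length
  decreasing_by simp; omega

def solution (new_id : String) : String :=
  let answer := PySem.Chars.lower new_id.toList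
  -- filter loop; `char in ['-','_','.']` is a list membership test
  let filtered := answer.foldl
    (fun acc ch => if PySem.Chars.isalnum ch || (['-', '_', '.'].contains ch) then acc ++ [ch] else acc) []
  let a3 := pvLoopA filtered
  let a4 := PySem.Chars.stripChars a3 ['.']
  let a5 := if a4 = [] then ['a'] else a4
  let a6 := if 16 ≤ a5.length then pvRstripDots (PySem.List.slice a5 none (some 15)) else a5
  String.mk (pvPadA a6)

-- ===== PORT B =====
-- one fused pass: lowercase, keep allowed chars, collapse '.'-runs via the last emitted char
-- (`c in "-_."` is a single-character membership test, ported as list membership — exact)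
def pvFusedB (s : List Char) : List Char :=
  s.foldl
    (fun out ch =>
      let c := PySem.Chars.lowerChar ch
      if PySem.Chars.isalnum c || (['-', '_', '.'].contains c) then
        if c ≠ '.' ∨ ¬(out ≠ [] ∧ out.getLast? = some '.') then out ++ [c] else out
      else out) []

def solution_alt (new_id : String) : String :=
  let core := PySem.Chars.stripChars (pvFusedB new_id.toList) ['.']
  let answer := if core = [] then ['a'] else core
  let answer2 := if 16 ≤ answer.length then pvRstripDots (PySem.List.slice answer none (some 15)) else answer
  let answer3 :=
    if answer2.length < 3 then
      match PySem.List.pyGet? answer2 (-1) with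
      | some c => answer2 ++ List.replicate (3 - answer2.length) c
      | none => answer2  -- Python raises IndexError here; unreachable (answer2 is nonempty)
    else answer2
  String.mk answer3

-- ===== PRECONDITION & SPEC =====
def Spec_solution (new_id : String) (out : String) : Prop := out = solution_alt new_id
instance (new_id : String) (out : String) : Decidable (Spec_solution new_id out) := by unfold Spec_solution; infer_instance

-- ===== CLAIM (what is proved, stated in full; the proofs are below) =====
def Claim_equal_solution : Prop := ∀ (new_id : String), Dom_solution new_id → Spec_solution new_id (solution new_id)

-- ===== LEMMAS AND PROOFS =====

-- the collapsed form: pvG b s collapses runs of '.'; b records whether the previously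
-- emitted character is a '.'
def pvG : Bool → List Char → List Char
  | _, [] => []
  | b, c :: r => if c = '.' then (if b then pvG true r else '.' :: pvG true r) else c :: pvG false r

theorem pvG_repl (s : List Char) : ∀ b, pvG b (pvRepl s) = pvG b s := by
  fun_induction pvRepl s with
  | case1 => intro b; rfl
  | case2 c => intro b; rfl
  | case3 c d r h ih =>
    intro b
    obtain ⟨h1, h2⟩ := h
    subst h1; subst h2
    cases b <;> simp [pvG, ih]
  | case4 c d r h ih =>
    intro b
    by_cases hc : c = '.'
    · subst hc
      have hd : d ≠ '.' := fun hd => h ⟨rfl, hd⟩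
      cases b <;> simp [pvG, ih]
    · cases b <;> simp [pvG, hc, ih]

theorem pvG_true_false (r : List Char) (h : r.head? ≠ some '.') : pvG true r = pvG false r := by
  cases r with
  | nil => rfl
  | cons c t =>
    simp at h
    simp [pvG, h]

theorem pvG_no_dd (s : List Char) (h : ¬ (['.', '.'] <:+: s)) : pvG false s = s := by
  induction s with
  | nil => rfl
  | cons c r ih =>
    rw [List.infix_cons_iff] at h
    push_neg at h
    obtain ⟨hp, hi⟩ := h
    by_cases hc : c = '.'
    · subst hc
      have hr : r.head? ≠ some '.' := by
        intro hh
        cases r with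
        | nil => simp at hh
        | cons d t =>
          simp at hh
          subst hh
          exact hp ⟨t, rfl⟩
      rw [pvG, if_pos rfl, if_neg (by simp), pvG_true_false r hr, ih hi]
    · rw [pvG, if_neg hc, ih hi]

theorem pvLoopA_eq_pvG (s : List Char) : pvLoopA s = pvG false s := by
  fun_induction pvLoopA s with
  | case1 s h ih =>
    rw [ih, replace_eq_pvRepl, pvG_repl]
  | case2 s h =>
    simp at h
    exact (pvG_no_dd s ((PySem.Chars.isIn_eq_false_iff _ _).mp h)).symm

-- B's fused fold step, written out (definitionally equal to the lambda in pvFusedB)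
def pvStepB (out : List Char) (ch : Char) : List Char :=
  if PySem.Chars.isalnum (PySem.Chars.lowerChar ch) || (['-', '_', '.'].contains (PySem.Chars.lowerChar ch)) then
    if PySem.Chars.lowerChar ch ≠ '.' ∨ ¬(out ≠ [] ∧ out.getLast? = some '.') then
      out ++ [PySem.Chars.lowerChar ch]
    else out
  else out

-- B's fused fold equals: filter the lowered string, then collapse
theorem pvFused_invariant (s : List Char) : ∀ (out : List Char),
    List.foldl pvStepB out s
      = out ++ pvG (out.getLast? == some '.')
          (List.filter (fun ch => PySem.Chars.isalnum ch || (['-', '_', '.'].contains ch))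
            (PySem.Chars.lower s)) := by
  induction s with
  | nil => intro out; simp [PySem.Chars.lower, pvG]
  | cons ch r ih =>
    intro out
    have hlow : PySem.Chars.lower (ch :: r) = PySem.Chars.lowerChar ch :: PySem.Chars.lower r := by
      simp [PySem.Chars.lower]
    rw [List.foldl_cons, hlow, List.filter_cons]
    by_cases hp : (PySem.Chars.isalnum (PySem.Chars.lowerChar ch)
        || (['-', '_', '.'].contains (PySem.Chars.lowerChar ch))) = true
    · rw [if_pos hp]
      simp only [pvStepB]
      rw [if_pos hp]
      by_cases hdot : PySem.Chars.lowerChar ch = '.'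
      · by_cases hlast : out ≠ [] ∧ out.getLast? = some '.'
        · have hcond : ¬ (PySem.Chars.lowerChar ch ≠ '.' ∨ ¬(out ≠ [] ∧ out.getLast? = some '.')) := by
            push_neg
            exact ⟨hdot, hlast⟩
          rw [if_neg hcond, ih out, hdot]
          have ht : (out.getLast? == some '.') = true := by simp [hlast.2]
          rw [ht]
          simp [pvG]
        · have hcond : (PySem.Chars.lowerChar ch ≠ '.' ∨ ¬(out ≠ [] ∧ out.getLast? = some '.')) :=
            Or.inr hlast
          rw [if_pos hcond, ih (out ++ [PySem.Chars.lowerChar ch]), hdot]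
          have ht : ((out ++ ['.']).getLast? == some '.') = true := by simp
          have hf : (out.getLast? == some '.') = false := by
            by_cases hout : out = []
            · subst hout; simp
            · simp
              intro hh
              exact absurd ⟨hout, hh⟩ hlast
          rw [ht, hf]
          simp [pvG]
      · have hcond : (PySem.Chars.lowerChar ch ≠ '.' ∨ ¬(out ≠ [] ∧ out.getLast? = some '.')) :=
          Or.inl hdot
        rw [if_pos hcond, ih (out ++ [PySem.Chars.lowerChar ch])]
        have hf : ((out ++ [PySem.Chars.lowerChar ch]).getLast? == some '.') = false := by
          simp [hdot]
        rw [hf]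
        cases hb : (out.getLast? == some '.') <;> simp [pvG, hdot]
    · rw [if_neg hp]
      simp only [pvStepB]
      rw [if_neg hp]
      exact ih out

theorem pvFusedB_eq (s : List Char) :
    pvFusedB s
      = pvLoopA ((PySem.Chars.lower s).foldl
          (fun acc ch => if PySem.Chars.isalnum ch || (['-', '_', '.'].contains ch) then acc ++ [ch] else acc) []) := by
  rw [pvLoopA_eq_pvG, PySem.List.foldl_append_if_eq_filter]
  have hB : pvFusedB s = List.foldl pvStepB [] s := rfl
  rw [hB, pvFused_invariant s []]
  simp

theorem pyGet_neg_one (l : List Char) : PySem.List.pyGet? l (-1) = l.getLast? := by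
  cases l with
  | nil => rfl
  | cons a t =>
    rw [List.getLast?_eq_getElem?]
    simp only [PySem.List.pyGet?, PySem.List.pyIdx?]
    norm_num

theorem pvPadA_eq (s : List Char) :
    pvPadA s =
      (if s.length < 3 then
        match PySem.List.pyGet? s (-1) with
        | some c => s ++ List.replicate (3 - s.length) c
        | none => s
      else s) := by
  fun_induction pvPadA s with
  | case1 s h c hg ih =>
    rw [ih]
    have hlast : (s ++ [c]).getLast? = some c := by simp
    have hg2 : PySem.List.pyGet? (s ++ [c]) (-1) = some c := by
      rw [pyGet_neg_one]; exact hlast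
    rw [if_pos h, hg]
    by_cases h2 : (s ++ [c]).length < 3
    · rw [if_pos h2, hg2]
      have h3 : 3 - s.length = (3 - (s ++ [c]).length) + 1 := by simp at h2 ⊢; omega
      simp only [h3]
      simp [List.replicate_succ]
    · rw [if_neg h2]
      have h3 : 3 - s.length = 1 := by simp at h2 ⊢; omega
      simp only [h3]
      simp
  | case2 s h hg =>
    rw [if_pos h, hg]
  | case3 s h =>
    rw [if_neg h]

-- ===== VERDICT (by name: the statement is the Claim_ definition above) =====
theorem solution_spec : Claim_equal_solution := by
  intro new_id _
  unfold Spec_solution solution solution_alt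
  simp only [← pvFusedB_eq, pvPadA_eq]
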